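-- pv_equiv track=rewrite | github.com/michaelglas/ndchess | src/ndchess/gui.py | world_to_screen
-- ===== SOURCE A (Python) =====
-- square_size = 20
--
-- def world_to_screen(wc,shape2d):
--     sx = wc[0]
--     sy = wc[1]
--     x = True
--     for i,sh in zip(wc[2:],shape2d):
--         if x:
--             sx += sh*i
--             x = False
--         else:
--             sy += sh*i
--             x = True
--     return square_size*sx,square_size*sy
-- ===== SOURCE B (Python) =====
-- square_size = 20
--
-- def _deinterleave(xs):
--     """Split xs into (elements at even positions, elements at odd positions)."""
--     return xs[0::2], xs[1::2]
--
-- def _dot(shs, idxs):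
--     return sum(sh * i for sh, i in zip(shs, idxs))
--
-- def world_to_screen(wc, shape2d):
--     sh_x, sh_y = _deinterleave(shape2d)
--     wc_x, wc_y = _deinterleave(wc[2:])
--     sx = wc[0] + _dot(sh_x, wc_x)
--     sy = wc[1] + _dot(sh_y, wc_y)
--     return square_size * sx, square_size * sy
-- ===== Notes on version B (the rewrite author's own statement) =====
-- stated objective: alternative
-- what changed: replaces A's single alternating pass with a boolean toggle by a staged computation: a recursive de-interleave splits shape2d and wc[2:] into even/odd-position lists, then the two screen coordinates are two independent dot products over those lists
import Mathlib
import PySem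

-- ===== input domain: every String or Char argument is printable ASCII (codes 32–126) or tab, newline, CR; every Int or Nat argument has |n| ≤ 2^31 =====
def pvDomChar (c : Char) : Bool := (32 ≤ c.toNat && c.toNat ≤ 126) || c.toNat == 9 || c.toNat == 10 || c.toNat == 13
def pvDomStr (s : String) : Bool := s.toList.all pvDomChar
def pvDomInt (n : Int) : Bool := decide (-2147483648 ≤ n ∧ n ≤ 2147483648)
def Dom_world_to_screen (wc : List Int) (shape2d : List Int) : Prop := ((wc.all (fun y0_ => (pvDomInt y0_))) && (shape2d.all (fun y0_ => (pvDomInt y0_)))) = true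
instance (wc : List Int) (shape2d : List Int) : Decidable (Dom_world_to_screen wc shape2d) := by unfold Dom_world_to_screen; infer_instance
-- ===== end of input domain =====

-- B replaces A's single alternating pass with a boolean toggle by a staged computation:
-- de-interleave shape2d and wc[2:] into even/odd-position stride slices, then compute the
-- two coordinates as two independent dot products; same cost ("alternative").

-- ===== PORT A =====
def world_to_screen (wc : List Int) (shape2d : List Int) : Int × Int :=
  let sx := (PySem.List.pyGet? wc 0).getD 0
  let sy := (PySem.List.pyGet? wc 1).getD 0
  let st := ((PySem.List.slice wc (some 2) none).zip shape2d).foldl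
    (fun (st : Int × Int × Bool) (p : Int × Int) =>
      if st.2.2 then (st.1 + p.2 * p.1, st.2.1, false)
      else (st.1, st.2.1 + p.2 * p.1, true)) (sx, sy, true)
  (20 * st.1, 20 * st.2.1)

-- ===== PORT B =====
/-- Source B's `_deinterleave`: (xs[0::2], xs[1::2]); step-2 slices never return `none`. -/
def wtsDeinterleave (xs : List Int) : List Int × List Int :=
  ((PySem.List.slice? xs (some 0) none 2).getD [], (PySem.List.slice? xs (some 1) none 2).getD [])

/-- Source B's `_dot`: sum(sh * i for sh, i in zip(shs, idxs)). -/
def wtsDot (shs idxs : List Int) : Int :=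
  (shs.zip idxs).foldl (fun acc p => acc + p.1 * p.2) 0

def world_to_screen_alt (wc : List Int) (shape2d : List Int) : Int × Int :=
  let sh := wtsDeinterleave shape2d
  let w := wtsDeinterleave (PySem.List.slice wc (some 2) none)
  let sx := (PySem.List.pyGet? wc 0).getD 0 + wtsDot sh.1 w.1
  let sy := (PySem.List.pyGet? wc 1).getD 0 + wtsDot sh.2 w.2
  (20 * sx, 20 * sy)

-- ===== PRECONDITION & SPEC =====
-- Pre_ excludes exactly the inputs with len(wc) < 2, on which A raises IndexError at wc[0]/wc[1] (B raises there too).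
def Pre_world_to_screen (wc : List Int) (shape2d : List Int) : Prop := 2 ≤ wc.length
instance (wc : List Int) (shape2d : List Int) : Decidable (Pre_world_to_screen wc shape2d) := by unfold Pre_world_to_screen; infer_instance
def pvWitness_world_to_screen : List Int × List Int := ([1, 2, 3], [4, 5])
def Spec_world_to_screen (wc : List Int) (shape2d : List Int) (out : Int × Int) : Prop := out = world_to_screen_alt wc shape2d
instance (wc : List Int) (shape2d : List Int) (out : Int × Int) : Decidable (Spec_world_to_screen wc shape2d out) := by unfold Spec_world_to_screen; infer_instance

-- ===== CLAIM (what is proved, stated in full; the proofs are below) =====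
def Claim_equal_world_to_screen : Prop := ∀ (wc : List Int) (shape2d : List Int), Dom_world_to_screen wc shape2d → Pre_world_to_screen wc shape2d → Spec_world_to_screen wc shape2d (world_to_screen wc shape2d)

-- ===== LEMMAS AND PROOFS =====

/-- Elements at even positions. -/
def wtsEvens : List Int → List Int
  | [] => []
  | [x] => [x]
  | x :: _ :: t => x :: wtsEvens t

/-- The step-2 index enumeration of `slice?` collects exactly the even positions of `xs.drop s`. -/
theorem wts_filterMap_evens (xs : List Int) : ∀ (s : Nat),
    List.filterMap (fun k : Nat => xs[((s : Int) + 2 * (k : Int)).toNat]?)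
      (List.range (if (s : Int) < (xs.length : Int) then (((xs.length : Int) - s + 2 - 1) / 2).toNat else 0))
    = wtsEvens (xs.drop s) := by
  intro s
  by_cases hs : s < xs.length
  · have hlt : (s : Int) < (xs.length : Int) := by exact_mod_cast hs
    rw [if_pos hlt]
    have hcount : (((xs.length : Int) - s + 2 - 1) / 2).toNat
        = (((xs.length : Int) - s + 2 - 1) / 2).toNat - 1 + 1 := by omega
    rw [hcount, List.range_succ_eq_map, List.filterMap_cons]
    have h0 : ((s : Int) + 2 * ((0 : Nat) : Int)).toNat = s := by simp
    rw [h0, List.getElem?_eq_getElem hs]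
    simp only [List.filterMap_map]
    have hfun : ((fun k : Nat => xs[((s : Int) + 2 * (k : Int)).toNat]?) ∘ Nat.succ)
        = fun k : Nat => xs[(((s + 2 : Nat) : Int) + 2 * (k : Int)).toNat]? := by
      funext k
      simp only [Function.comp]
      congr 1
      push_cast
      ring_nf
    rw [hfun]
    have hih := wts_filterMap_evens xs (s + 2)
    by_cases h2 : s + 1 < xs.length
    · have hlt2 : ((s + 2 : Nat) : Int) < (xs.length : Int) ∨ ¬ (((s + 2 : Nat) : Int) < (xs.length : Int)) := em _
      have hcnt2 : (((xs.length : Int) - s + 2 - 1) / 2).toNat - 1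
          = if ((s + 2 : Nat) : Int) < (xs.length : Int) then (((xs.length : Int) - ((s + 2 : Nat) : Int) + 2 - 1) / 2).toNat else 0 := by
        split_ifs with h' <;> omega
      rw [hcnt2, hih]
      obtain ⟨x, y, t, hdrop⟩ : ∃ x y t, xs.drop s = x :: y :: t := by
        rcases hd : xs.drop s with _ | ⟨x, tl⟩
        · exfalso; have := List.drop_eq_nil_iff.mp hd; omega
        · rcases htl : tl with _ | ⟨y, t⟩
          · exfalso
            have hlen : (xs.drop s).length = xs.length - s := List.length_drop ..
            rw [hd, htl] at hlen; simp at hlen; omega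
          · exact ⟨x, y, t, by simpa [htl] using hd⟩
      have ht : xs.drop (s + 2) = t := by
        have h22 : xs.drop (s + 2) = (xs.drop s).drop 2 := by rw [List.drop_drop]
        rw [h22, hdrop]; rfl
      have hx : xs[s] = x := by
        have hg := List.getElem_drop (xs := xs) (i := s) (j := 0) (h := by simp [hdrop])
        simpa [hdrop] using hg.symm
      rw [hdrop, ht, hx, wtsEvens]
    · have hone : s + 1 = xs.length := by omega
      have hcnt1 : (((xs.length : Int) - s + 2 - 1) / 2).toNat - 1 = 0 := by omega
      rw [hcnt1]
      simp only [List.range_zero, List.filterMap_nil]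
      have hdrop : xs.drop s = [xs[s]] := by
        apply List.ext_getElem
        · simp; omega
        · intro i h1' h2'
          have hi : i = 0 := by simp at h2'; omega
          subst hi
          have hg := List.getElem_drop (xs := xs) (i := s) (j := 0) (h := by omega)
          simpa using hg.symm
      rw [hdrop, wtsEvens]
  · have hge : ¬ ((s : Int) < (xs.length : Int)) := by omega
    rw [if_neg hge, List.range_zero, List.filterMap_nil,
        List.drop_eq_nil_of_le (by omega), wtsEvens]
termination_by s => xs.length - s
decreasing_by omega

theorem wts_slice?_evens (xs : List Int) :
    PySem.List.slice? xs (some 0) none 2 = some (wtsEvens xs) := by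
  unfold PySem.List.slice? PySem.List.sliceIndices
  norm_num
  simpa using wts_filterMap_evens xs 0

theorem wts_slice?_odds (xs : List Int) :
    PySem.List.slice? xs (some 1) none 2 = some (wtsEvens xs.tail) := by
  unfold PySem.List.slice? PySem.List.sliceIndices
  norm_num
  cases xs with
  | nil => simp [wtsEvens]
  | cons x t =>
    have h := wts_filterMap_evens (x :: t) 1
    have hmin : min (1 : Int) ((x :: t).length : Int) = 1 := by
      simp only [List.length_cons]; omega
    simp only [List.length_cons, List.tail_cons] at *
    rw [hmin] at *
    push_cast at h ⊢
    simpa using h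

theorem wtsEvens_cons (x : Int) (t : List Int) :
    wtsEvens (x :: t) = x :: wtsEvens t.tail := by
  cases t <;> rfl

/-- Pairwise sums of a zipped (i, sh) list: even positions feed x, odd positions feed y. -/
def wtsPairSum : List (Int × Int) → Int × Int
  | [] => (0, 0)
  | [(i, sh)] => (sh * i, 0)
  | (i, sh) :: (i2, sh2) :: t =>
    let p := wtsPairSum t
    (sh * i + p.1, sh2 * i2 + p.2)

theorem wts_foldA : ∀ (l : List (Int × Int)) (sx sy : Int),
    (l.foldl (fun (st : Int × Int × Bool) (p : Int × Int) =>
      if st.2.2 then (st.1 + p.2 * p.1, st.2.1, false)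
      else (st.1, st.2.1 + p.2 * p.1, true)) (sx, sy, true)).1 = sx + (wtsPairSum l).1 ∧
    (l.foldl (fun (st : Int × Int × Bool) (p : Int × Int) =>
      if st.2.2 then (st.1 + p.2 * p.1, st.2.1, false)
      else (st.1, st.2.1 + p.2 * p.1, true)) (sx, sy, true)).2.1 = sy + (wtsPairSum l).2
  | [], sx, sy => by simp [wtsPairSum]
  | [(i, sh)], sx, sy => by simp [wtsPairSum]
  | (i, sh) :: (i2, sh2) :: t, sx, sy => by
    obtain ⟨h1, h2⟩ := wts_foldA t (sx + sh * i) (sy + sh2 * i2)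
    simp only [List.foldl, wtsPairSum] at *
    norm_num at *
    constructor <;> omega

theorem wtsDot_shift (l : List (Int × Int)) : ∀ (c : Int),
    l.foldl (fun acc p => acc + p.1 * p.2) c = c + l.foldl (fun acc p => acc + p.1 * p.2) 0 := by
  induction l with
  | nil => intro c; simp
  | cons h t ih => intro c; simp only [List.foldl]; rw [ih (c + h.1 * h.2), ih (0 + h.1 * h.2)]; ring

theorem wtsDot_cons (s i : Int) (S I : List Int) :
    wtsDot (s :: S) (i :: I) = s * i + wtsDot S I := by
  simp only [wtsDot, List.zip_cons_cons, List.foldl]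
  rw [wtsDot_shift]; ring

/-- Bridge: the alternating pair sums of `a.zip b` are the two dot products of the
even/odd halves (b's against a's), including zip truncation. -/
theorem wts_key : ∀ (a b : List Int),
    wtsPairSum (a.zip b)
      = (wtsDot (wtsEvens b) (wtsEvens a), wtsDot (wtsEvens b.tail) (wtsEvens a.tail))
  | [], b => by cases b <;> simp [wtsPairSum, wtsEvens, wtsDot]
  | i :: at_, [] => by simp [wtsPairSum, wtsEvens, wtsDot]
  | [i], s :: bt => by
    cases bt <;> simp [wtsPairSum, wtsEvens, wtsDot]
  | i1 :: i2 :: at_, [s] => by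
    cases at_ <;> simp [wtsPairSum, wtsEvens, wtsDot]
  | i1 :: i2 :: at_, s1 :: s2 :: bt => by
    have ih := wts_key at_ bt
    simp only [List.zip_cons_cons, wtsPairSum, wtsEvens, List.tail_cons, ih, wtsDot_cons,
      wtsEvens_cons]

-- ===== VERDICT (by name: the statement is the Claim_ definition above) =====
theorem world_to_screen_spec : Claim_equal_world_to_screen := by
  intro wc shape2d _hdom _hpre
  unfold Spec_world_to_screen world_to_screen world_to_screen_alt wtsDeinterleave
  rw [wts_slice?_evens, wts_slice?_odds, wts_slice?_evens, wts_slice?_odds]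
  have hA := wts_foldA ((PySem.List.slice wc (some 2) none).zip shape2d)
    ((PySem.List.pyGet? wc 0).getD 0) ((PySem.List.pyGet? wc 1).getD 0)
  have hK := wts_key (PySem.List.slice wc (some 2) none) shape2d
  simp only [hA.1, hA.2, hK, Option.getD_some]
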